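-- pv_equiv track=rewrite | github.com/thingineeer/programmers | 행렬과 연산.py | solution
-- ===== SOURCE A (Python) =====
-- from collections import deque
--
-- def solution(rc, operations):
--
--     rc = deque([deque(i) for i in rc])
--     firsts = deque()
--     lasts = deque()
--
--     for i in rc:
--         firsts.append(i.popleft())
--         lasts.append(i.pop())
--
--     for op in operations:
--         if op == "Rotate":
--             rc[0].appendleft(firsts.popleft())
--             lasts.appendleft(rc[0].pop())
--             rc[-1].append(lasts.pop())
--             firsts.append(rc[-1].popleft())
--         else:
--             firsts.appendleft(firsts.pop())
--             rc.appendleft(rc.pop())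
--             lasts.appendleft(lasts.pop())
--
--     for i in rc:
--         i.appendleft(firsts.popleft())
--         i.append(lasts.popleft())
--
--     return [list(i) for i in rc]
-- ===== SOURCE B (Python) =====
-- # B: keep the whole matrix as a list of rows; ShiftRow is a slice rotation of the
-- # row list, Rotate rebuilds the grid as one clockwise rotation of its border
-- # (simpler: no separate first/last-column bookkeeping).
--
-- def rotate(m):
--     top = [m[1][0]] + m[0][:-1]
--     middle = [[b[0]] + r[1:-1] + [a[-1]] for a, r, b in zip(m, m[1:], m[2:])]
--     bottom = m[-1][1:] + [m[-2][-1]]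
--     return [top] + middle + [bottom]
--
-- def solution(rc, operations):
--     rows = [list(r) for r in rc]
--     for op in operations:
--         if op == "Rotate":
--             rows = rotate(rows)
--         else:
--             rows = rows[-1:] + rows[:-1]
--     return rows
-- ===== Notes on version B (the rewrite author's own statement) =====
-- stated objective: simpler
-- what changed: B keeps the whole matrix as a list of rows (ShiftRow = slice rotation of the row list, Rotate = rebuilding the grid as one clockwise border rotation) instead of A's three deques holding the first column, last column and row middles.
-- outside the precondition, e.g. on solution([[1, 2, 3]], ['Rotate']): A returns [[1, 3, 2]], B raises IndexError
import Mathlib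
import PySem

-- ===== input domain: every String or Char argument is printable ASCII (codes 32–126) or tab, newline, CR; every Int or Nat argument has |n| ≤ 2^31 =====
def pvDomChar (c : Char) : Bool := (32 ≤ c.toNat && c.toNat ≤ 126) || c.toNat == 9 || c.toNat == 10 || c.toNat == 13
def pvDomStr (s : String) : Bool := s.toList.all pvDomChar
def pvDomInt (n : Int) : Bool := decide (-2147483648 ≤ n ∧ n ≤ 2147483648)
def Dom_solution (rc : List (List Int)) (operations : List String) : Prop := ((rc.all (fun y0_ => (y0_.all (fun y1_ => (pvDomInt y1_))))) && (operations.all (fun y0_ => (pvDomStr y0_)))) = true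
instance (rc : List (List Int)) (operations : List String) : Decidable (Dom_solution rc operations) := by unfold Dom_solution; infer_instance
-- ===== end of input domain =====

-- B keeps the matrix as a list of whole rows (ShiftRow = slice rotation of the row
-- list, Rotate = one clockwise border rotation of the grid) instead of A's three
-- deques for first column, last column and row middles; objective: simpler.

-- ===== PORT A =====
-- deque rotated right by one: d.appendleft(d.pop())
def pvRotR {α : Type} (l : List α) : List α :=
  match l.getLast? with
  | none => []
  | some x => x :: l.dropLast

-- apply g to the last element (mutation of rc[-1])
def pvModLast (g : List Int → List Int) : List (List Int) → List (List Int)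
  | [] => []
  | [x] => [g x]
  | x :: y :: xs => x :: pvModLast g (y :: xs)

-- one "Rotate" of A, sequentially on the state (middles, firsts, lasts)
def pvStepA (st : List (List Int) × List Int × List Int) : List (List Int) × List Int × List Int :=
  -- rc[0].appendleft(firsts.popleft())
  let x := st.2.1.headI
  let firsts := st.2.1.drop 1
  let rc := st.1.modifyHead (fun r => x :: r)
  -- lasts.appendleft(rc[0].pop())
  let y := (rc.headD []).getLastD 0
  let rc := rc.modifyHead List.dropLast
  let lasts := y :: st.2.2
  -- rc[-1].append(lasts.pop())
  let z := lasts.getLastD 0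
  let lasts := lasts.dropLast
  let rc := pvModLast (fun r => r ++ [z]) rc
  -- firsts.append(rc[-1].popleft())
  let w := (rc.getLastD []).headI
  let rc := pvModLast (fun r => r.drop 1) rc
  (rc, firsts ++ [w], lasts)

-- loop body of A
def pvStep (st : List (List Int) × List Int × List Int) (op : String) :
    List (List Int) × List Int × List Int :=
  if op = "Rotate" then pvStepA st else (pvRotR st.1, pvRotR st.2.1, pvRotR st.2.2)

-- final loop: i.appendleft(firsts.popleft()); i.append(lasts.popleft())
def pvReassemble : List Int → List (List Int) → List Int → List (List Int)
  | f :: fs, r :: rs, l :: ls => (f :: (r ++ [l])) :: pvReassemble fs rs ls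
  | _, _, _ => []

def solution (rc : List (List Int)) (operations : List String) : List (List Int) :=
  let mids := rc.map (fun r => (r.drop 1).dropLast)
  let firsts := rc.map (fun r => r.headI)
  let lasts := rc.map (fun r => r.getLastD 0)
  let st := operations.foldl pvStep (mids, firsts, lasts)
  pvReassemble st.2.1 st.1 st.2.2

-- ===== PORT B =====
-- the zip(m, m[1:], m[2:]) comprehension of B's rotate
def pvZip3Rows : List (List Int) → List (List Int) → List (List Int) → List (List Int)
  | a :: as, r :: rs, b :: bs =>
      (b.headI :: (((r.drop 1).dropLast) ++ [a.getLastD 0])) :: pvZip3Rows as rs bs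
  | _, _, _ => []

-- one clockwise border rotation of the whole grid
def pvRotateB (m : List (List Int)) : List (List Int) :=
  let top := (m.getD 1 []).headI :: (m.headD []).dropLast
  let middle := pvZip3Rows m (m.drop 1) (m.drop 2)
  let bottom := (m.getLastD []).drop 1 ++ [((m.dropLast).getLastD []).getLastD 0]
  top :: (middle ++ [bottom])

-- loop body of B
def pvStepB (rows : List (List Int)) (op : String) : List (List Int) :=
  if op = "Rotate" then pvRotateB rows
  else rows.drop (rows.length - 1) ++ rows.dropLast  -- rows[-1:] + rows[:-1]

def solution_alt (rc : List (List Int)) (operations : List String) : List (List Int) :=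
  operations.foldl pvStepB rc

-- ===== PRECONDITION & SPEC =====
-- Pre_ excludes (a) rows shorter than 2 and a nonempty operation list on an empty
-- matrix, where A raises IndexError, and (b) single-row matrices with a "Rotate",
-- where A's value is an artefact of rotating the shared top/bottom deque and B's
-- whole-grid border rotation raises IndexError.
def Pre_solution (rc : List (List Int)) (operations : List String) : Prop :=
  (∀ r ∈ rc, 2 ≤ r.length) ∧ (rc = [] → operations = []) ∧
    (2 ≤ rc.length ∨ "Rotate" ∉ operations)
instance (rc : List (List Int)) (operations : List String) : Decidable (Pre_solution rc operations) := by
  unfold Pre_solution; infer_instance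

def pvWitness_solution : List (List Int) × List String :=
  ([[1, 2], [3, 4]], ["Rotate", "ShiftRow"])

def Spec_solution (rc : List (List Int)) (operations : List String) (out : List (List Int)) : Prop := out = solution_alt rc operations
instance (rc : List (List Int)) (operations : List String) (out : List (List Int)) : Decidable (Spec_solution rc operations out) := by unfold Spec_solution; infer_instance

-- ===== CLAIM (what is proved, stated in full; the proofs are below) =====
def Claim_equal_solution : Prop := ∀ (rc : List (List Int)) (operations : List String), Dom_solution rc operations → Pre_solution rc operations → Spec_solution rc operations (solution rc operations)

-- ===== LEMMAS AND PROOFS =====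

theorem pv_dl (t : List Int) (b : Int) : (b :: t).dropLast ++ [t.getLastD b] = b :: t := by
  induction t generalizing b with
  | nil => rfl
  | cons c t' ih =>
      rw [show (b :: c :: t').dropLast = b :: (c :: t').dropLast from rfl,
        List.getLastD_cons, List.cons_append, ih c]

theorem pv_row_self (r : List Int) (h : 2 ≤ r.length) :
    r.headI :: (((r.drop 1).dropLast) ++ [r.getLastD 0]) = r := by
  match r, h with
  | a :: b :: t, _ =>
      rw [show (a :: b :: t).headI = a from rfl, show (a :: b :: t).drop 1 = b :: t from rfl,
        List.getLastD_cons, List.getLastD_cons, pv_dl t b]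

theorem pv_re_self (rc : List (List Int)) (h : ∀ r ∈ rc, 2 ≤ r.length) :
    pvReassemble (rc.map (fun r => r.headI)) (rc.map (fun r => (r.drop 1).dropLast))
      (rc.map (fun r => r.getLastD 0)) = rc := by
  induction rc with
  | nil => rfl
  | cons r rs ih =>
      simp only [List.map_cons, pvReassemble]
      rw [pv_row_self r (h r (by simp)), ih (fun r hr => h r (by simp [hr]))]

-- getLastD of a nonempty list does not depend on the default
theorem pv_gld_indep {α : Type} (xs : List α) (d d' : α) (h : xs ≠ []) :
    xs.getLastD d = xs.getLastD d' := by
  cases xs with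
  | nil => exact absurd rfl h
  | cons a l => rw [List.getLastD_cons, List.getLastD_cons]

theorem pv_rotR_eq {α : Type} (a : α) (l : List α) (d : α) :
    pvRotR (a :: l) = (a :: l).getLastD d :: (a :: l).dropLast := by
  unfold pvRotR
  cases h : (a :: l).getLast? with
  | none => simp at h
  | some x => simp [List.getLastD_eq_getLast?, h]

theorem pv_rotR_len {α : Type} (l : List α) : (pvRotR l).length = l.length := by
  cases l with
  | nil => rfl
  | cons a t =>
      rw [pv_rotR_eq a t a]
      simp [List.length_dropLast]

theorem pv_modLast_ne_nil (g : List Int → List Int) (m : List Int) (ms : List (List Int)) :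
    pvModLast g (m :: ms) ≠ [] := by
  cases ms <;> simp [pvModLast]

theorem pv_modLast_cons_of_ne (g : List Int → List Int) (x : List Int) (xs : List (List Int))
    (h : xs ≠ []) : pvModLast g (x :: xs) = x :: pvModLast g xs := by
  cases xs with
  | nil => exact absurd rfl h
  | cons y ys => rfl

theorem pv_modLast_len (g : List Int → List Int) (xs : List (List Int)) :
    (pvModLast g xs).length = xs.length := by
  induction xs with
  | nil => rfl
  | cons x ys ih =>
      cases ys with
      | nil => rfl
      | cons y ys' => simpa [pvModLast] using ih

theorem pv_headI_drop (q : List Int) (h : q ≠ []) : q.headI :: q.drop 1 = q := by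
  cases q with
  | nil => exact absurd rfl h
  | cons a t => rfl

-- length of the reassembled matrix
theorem pv_re_len : ∀ (fs : List Int) (ms : List (List Int)) (ls : List Int),
    fs.length = ms.length → ms.length = ls.length →
    (pvReassemble fs ms ls).length = fs.length
  | [], [], _, _, _ => rfl
  | [], _ :: _, _, h1, _ => by simp at h1
  | _ :: _, [], _, h1, _ => by simp at h1
  | _ :: _, _ :: _, [], _, h2 => by simp at h2
  | f :: fs, m :: ms, l :: ls, h1, h2 => by
      simp only [pvReassemble, List.length_cons]
      rw [pv_re_len fs ms ls (by simpa using h1) (by simpa using h2)]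

theorem pv_re_getLast : ∀ (fs : List Int) (ms : List (List Int)) (ls : List Int)
    (f : Int) (m : List Int) (l : Int) (d : List Int) (df : Int) (dm : List Int) (dl : Int),
    fs.length = ms.length → ms.length = ls.length →
    (pvReassemble (f :: fs) (m :: ms) (l :: ls)).getLastD d
      = (f :: fs).getLastD df :: (((m :: ms).getLastD dm) ++ [(l :: ls).getLastD dl])
  | [], [], [], f, m, l, d, df, dm, dl, _, _ => by
      simp [pvReassemble]
  | [], _ :: _, _, _, _, _, _, _, _, _, h1, _ => by simp at h1
  | _ :: _, [], _, _, _, _, _, _, _, _, h1, _ => by simp at h1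
  | _ :: _, _ :: _, [], _, _, _, _, _, _, _, _, h2 => by simp at h2
  | f' :: fs, m' :: ms, l' :: ls, f, m, l, d, df, dm, dl, h1, h2 => by
      rw [show pvReassemble (f :: f' :: fs) (m :: m' :: ms) (l :: l' :: ls)
            = (f :: (m ++ [l])) :: pvReassemble (f' :: fs) (m' :: ms) (l' :: ls) from rfl,
        List.getLastD_cons,
        pv_re_getLast fs ms ls f' m' l' (f :: (m ++ [l])) f m l
          (by simpa using h1) (by simpa using h2)]
      simp only [List.getLastD_cons]

theorem pv_re_dropLast : ∀ (fs : List Int) (ms : List (List Int)) (ls : List Int)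
    (f : Int) (m : List Int) (l : Int),
    fs.length = ms.length → ms.length = ls.length →
    (pvReassemble (f :: fs) (m :: ms) (l :: ls)).dropLast
      = pvReassemble ((f :: fs).dropLast) ((m :: ms).dropLast) ((l :: ls).dropLast)
  | [], [], [], f, m, l, _, _ => rfl
  | [], _ :: _, _, _, _, _, h1, _ => by simp at h1
  | _ :: _, [], _, _, _, _, h1, _ => by simp at h1
  | _ :: _, _ :: _, [], _, _, _, _, h2 => by simp at h2
  | f' :: fs, m' :: ms, l' :: ls, f, m, l, h1, h2 => by
      rw [show pvReassemble (f :: f' :: fs) (m :: m' :: ms) (l :: l' :: ls)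
            = (f :: (m ++ [l])) :: pvReassemble (f' :: fs) (m' :: ms) (l' :: ls) from rfl]
      rw [show ((f :: (m ++ [l])) :: pvReassemble (f' :: fs) (m' :: ms) (l' :: ls)).dropLast
            = (f :: (m ++ [l])) :: (pvReassemble (f' :: fs) (m' :: ms) (l' :: ls)).dropLast from by
          cases hx : pvReassemble (f' :: fs) (m' :: ms) (l' :: ls) with
          | nil =>
              have := pv_re_len (f' :: fs) (m' :: ms) (l' :: ls) (by simpa using h1) (by simpa using h2)
              rw [hx] at this; simp at this
          | cons r rs => rfl]
      rw [pv_re_dropLast fs ms ls f' m' l' (by simpa using h1) (by simpa using h2)]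
      rfl

-- rows[-1:] as drop (length - 1)
theorem pv_drop_sub_one : ∀ (xs : List (List Int)) (x : List Int),
    (x :: xs).drop ((x :: xs).length - 1) = [(x :: xs).getLastD []]
  | [], x => rfl
  | y :: xs', x => by
      rw [List.getLastD_cons]
      simpa using pv_drop_sub_one xs' y

-- the zip(m, m[1:], m[2:]) comprehension on an assembled matrix
theorem pv_zip3_eq : ∀ (ft : List Int) (mt : List (List Int)) (lt : List Int)
    (f' f'' : Int) (m' m'' : List Int) (l' l'' : Int),
    ft.length = mt.length → mt.length = lt.length →
    pvZip3Rows ((f'' :: (m'' ++ [l''])) :: (f' :: (m' ++ [l'])) :: pvReassemble ft mt lt)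
      ((f' :: (m' ++ [l'])) :: pvReassemble ft mt lt) (pvReassemble ft mt lt)
      = pvReassemble ft (m' :: mt) (l'' :: l' :: lt)
  | [], [], _, _, _, _, _, _, _, _, _ => rfl
  | [], _ :: _, _, _, _, _, _, _, _, h1, _ => by simp at h1
  | _ :: _, [], _, _, _, _, _, _, _, h1, _ => by simp at h1
  | _ :: _, _ :: _, [], _, _, _, _, _, _, _, h2 => by simp at h2
  | a :: ft', b :: mt', c :: lt', f', f'', m', m'', l', l'', h1, h2 => by
      rw [show pvReassemble (a :: ft') (b :: mt') (c :: lt')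
            = (a :: (b ++ [c])) :: pvReassemble ft' mt' lt' from rfl]
      rw [show pvZip3Rows ((f'' :: (m'' ++ [l''])) :: (f' :: (m' ++ [l'])) :: (a :: (b ++ [c])) :: pvReassemble ft' mt' lt')
            ((f' :: (m' ++ [l'])) :: (a :: (b ++ [c])) :: pvReassemble ft' mt' lt')
            ((a :: (b ++ [c])) :: pvReassemble ft' mt' lt')
          = ((a :: (b ++ [c])).headI :: ((((f' :: (m' ++ [l'])).drop 1).dropLast)
              ++ [(f'' :: (m'' ++ [l''])).getLastD 0]))
            :: pvZip3Rows ((f' :: (m' ++ [l'])) :: (a :: (b ++ [c])) :: pvReassemble ft' mt' lt')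
              ((a :: (b ++ [c])) :: pvReassemble ft' mt' lt') (pvReassemble ft' mt' lt') from rfl]
      rw [pv_zip3_eq ft' mt' lt' a f' b m' c l' (by simpa using h1) (by simpa using h2)]
      rw [show (f'' :: (m'' ++ [l''])).getLastD 0 = (m'' ++ [l'']).getLastD f'' from List.getLastD_cons,
        List.getLastD_concat]
      rw [show ((f' :: (m' ++ [l'])).drop 1).dropLast = (m' ++ [l']).dropLast from rfl,
        List.dropLast_concat]
      rfl

-- the tail of A's state after one Rotate, reassembled
theorem pv_R2 : ∀ (ft : List Int) (m : List Int) (ms : List (List Int))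
    (l l' : Int) (ls : List Int) (z : Int),
    ft.length = ms.length → ms.length = ls.length →
    pvReassemble (ft ++ [((pvModLast (fun r => r ++ [z]) (m :: ms)).getLastD []).headI])
      (pvModLast (fun r => r.drop 1) (pvModLast (fun r => r ++ [z]) (m :: ms)))
      (l :: (l' :: ls).dropLast)
      = pvReassemble ft (m :: ms) (l :: l' :: ls)
        ++ [((m :: ms).getLastD []) ++ [z, ((l :: l' :: ls).dropLast).getLastD 0]]
  | [], m, [], l, l', ls, z, _, h2 => by
      have hls : ls = [] := by simpa using h2.symm
      subst hls
      rw [show pvModLast (fun r => r ++ [z]) [m] = [m ++ [z]] from rfl,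
        show pvModLast (fun r => List.drop 1 r) [m ++ [z]] = [(m ++ [z]).drop 1] from rfl,
        show ([m ++ [z]] : List (List Int)).getLastD [] = m ++ [z] from rfl,
        show ((l' :: ([] : List Int)).dropLast) = ([] : List Int) from rfl]
      rw [show pvReassemble ([] ++ [(m ++ [z]).headI]) [(m ++ [z]).drop 1] (l :: [])
            = [(m ++ [z]).headI :: (((m ++ [z]).drop 1) ++ [l])] from rfl]
      rw [show (m ++ [z]).headI :: (((m ++ [z]).drop 1) ++ [l])
            = ((m ++ [z]).headI :: ((m ++ [z]).drop 1)) ++ [l] from rfl]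
      rw [pv_headI_drop (m ++ [z]) (by simp)]
      simp [show pvReassemble [] [m] [l, l'] = ([] : List (List Int)) from rfl]
  | [], _, _ :: _, _, _, _, _, h1, _ => by simp at h1
  | _ :: _, _, [], _, _, _, _, h1, _ => by simp at h1
  | _ :: _, _, _ :: _, _, _, [], _, _, h2 => by simp at h2
  | a :: ft', m, b :: ms', l, l', c :: ls', z, h1, h2 => by
      have hW : pvModLast (fun r => r ++ [z]) (b :: ms') ≠ [] := pv_modLast_ne_nil _ b ms'
      rw [show pvModLast (fun r => r ++ [z]) (m :: b :: ms')
            = m :: pvModLast (fun r => r ++ [z]) (b :: ms') from rfl,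
        pv_modLast_cons_of_ne _ m _ hW,
        List.cons_append,
        show (l' :: c :: ls').dropLast = l' :: (c :: ls').dropLast from rfl]
      rw [show pvReassemble (a :: (ft' ++ [((m :: pvModLast (fun r => r ++ [z]) (b :: ms')).getLastD []).headI]))
            (m :: pvModLast (fun r => List.drop 1 r) (pvModLast (fun r => r ++ [z]) (b :: ms')))
            (l :: l' :: (c :: ls').dropLast)
          = (a :: (m ++ [l])) :: pvReassemble (ft' ++ [((m :: pvModLast (fun r => r ++ [z]) (b :: ms')).getLastD []).headI])
              (pvModLast (fun r => List.drop 1 r) (pvModLast (fun r => r ++ [z]) (b :: ms')))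
              (l' :: (c :: ls').dropLast) from rfl]
      rw [show ((m :: pvModLast (fun r => r ++ [z]) (b :: ms')).getLastD [])
            = (pvModLast (fun r => r ++ [z]) (b :: ms')).getLastD m from List.getLastD_cons,
        pv_gld_indep _ m [] hW]
      rw [pv_R2 ft' b ms' l' c ls' z (by simpa using h1) (by simpa using h2)]
      rw [show pvReassemble (a :: ft') (m :: b :: ms') (l :: l' :: c :: ls')
            = (a :: (m ++ [l])) :: pvReassemble ft' (b :: ms') (l' :: c :: ls') from rfl]
      rw [show ((m :: b :: ms').getLastD ([] : List Int)) = (b :: ms').getLastD m from List.getLastD_cons,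
        pv_gld_indep (b :: ms') m [] (by simp)]
      rw [show (l :: l' :: c :: ls').dropLast = l :: (l' :: c :: ls').dropLast from rfl,
        show (l :: (l' :: c :: ls').dropLast).getLastD 0
            = ((l' :: c :: ls').dropLast).getLastD l from List.getLastD_cons,
        pv_gld_indep ((l' :: c :: ls').dropLast) l 0 (by
          rw [show (l' :: c :: ls').dropLast = l' :: (c :: ls').dropLast from rfl]; simp)]
      rfl

-- A's Rotate step, written out
theorem pv_stepA_shape (f0 f1 : Int) (ft : List Int) (m0 m1 : List Int) (mt : List (List Int))
    (l0 l1 : Int) (lt : List Int) :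
    pvStepA (m0 :: m1 :: mt, f0 :: f1 :: ft, l0 :: l1 :: lt)
      = (((f0 :: m0).dropLast)
           :: pvModLast (fun r => r.drop 1)
                (pvModLast (fun r => r ++ [(l1 :: lt).getLastD 0]) (m1 :: mt)),
         f1 :: (ft ++ [((pvModLast (fun r => r ++ [(l1 :: lt).getLastD 0]) (m1 :: mt)).getLastD []).headI]),
         (f0 :: m0).getLastD 0 :: l0 :: (l1 :: lt).dropLast) := by
  have hW : pvModLast (fun r => r ++ [(l1 :: lt).getLastD 0]) (m1 :: mt) ≠ [] :=
    pv_modLast_ne_nil _ m1 mt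
  simp only [pvStepA, List.headI_cons, List.modifyHead_cons, List.headD_cons]
  rw [show ((f0 :: f1 :: ft).drop 1) = f1 :: ft from rfl]
  rw [show (((f0 :: m0).getLastD 0 :: l0 :: l1 :: lt).getLastD 0) = (l1 :: lt).getLastD 0 from by
        simp only [List.getLastD_cons]]
  rw [show ((f0 :: m0).getLastD 0 :: l0 :: l1 :: lt).dropLast
        = (f0 :: m0).getLastD 0 :: l0 :: (l1 :: lt).dropLast from rfl]
  rw [show pvModLast (fun r => r ++ [(l1 :: lt).getLastD 0]) ((f0 :: m0).dropLast :: m1 :: mt)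
        = (f0 :: m0).dropLast :: pvModLast (fun r => r ++ [(l1 :: lt).getLastD 0]) (m1 :: mt) from rfl]
  rw [pv_modLast_cons_of_ne _ _ _ hW]
  rw [show (((f0 :: m0).dropLast :: pvModLast (fun r => r ++ [(l1 :: lt).getLastD 0]) (m1 :: mt)).getLastD [])
        = (pvModLast (fun r => r ++ [(l1 :: lt).getLastD 0]) (m1 :: mt)).getLastD ((f0 :: m0).dropLast)
      from List.getLastD_cons,
    pv_gld_indep _ _ [] hW]
  rfl

-- one Rotate: B's border rotation of the assembled grid = A's step, reassembled
theorem pv_rot_eq (f0 f1 : Int) (ft : List Int) (m0 m1 : List Int) (mt : List (List Int))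
    (l0 l1 : Int) (lt : List Int)
    (h1 : ft.length = mt.length) (h2 : mt.length = lt.length) :
    pvRotateB (pvReassemble (f0 :: f1 :: ft) (m0 :: m1 :: mt) (l0 :: l1 :: lt))
      = pvReassemble (pvStepA (m0 :: m1 :: mt, f0 :: f1 :: ft, l0 :: l1 :: lt)).2.1
          (pvStepA (m0 :: m1 :: mt, f0 :: f1 :: ft, l0 :: l1 :: lt)).1
          (pvStepA (m0 :: m1 :: mt, f0 :: f1 :: ft, l0 :: l1 :: lt)).2.2
    := by
  rw [pv_stepA_shape]
  rw [show pvReassemble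
        (f1 :: (ft ++ [((pvModLast (fun r => r ++ [(l1 :: lt).getLastD 0]) (m1 :: mt)).getLastD []).headI]))
        ((f0 :: m0).dropLast
           :: pvModLast (fun r => List.drop 1 r)
                (pvModLast (fun r => r ++ [(l1 :: lt).getLastD 0]) (m1 :: mt)))
        ((f0 :: m0).getLastD 0 :: l0 :: (l1 :: lt).dropLast)
      = (f1 :: ((f0 :: m0).dropLast ++ [(f0 :: m0).getLastD 0]))
          :: pvReassemble
              (ft ++ [((pvModLast (fun r => r ++ [(l1 :: lt).getLastD 0]) (m1 :: mt)).getLastD []).headI])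
              (pvModLast (fun r => List.drop 1 r)
                (pvModLast (fun r => r ++ [(l1 :: lt).getLastD 0]) (m1 :: mt)))
              (l0 :: (l1 :: lt).dropLast) from rfl]
  rw [pv_R2 ft m1 mt l0 l1 lt ((l1 :: lt).getLastD 0) h1 h2]
  rw [show ((f0 :: m0).getLastD 0) = m0.getLastD f0 from List.getLastD_cons, pv_dl m0 f0]
  -- now expand the B side
  rw [show pvReassemble (f0 :: f1 :: ft) (m0 :: m1 :: mt) (l0 :: l1 :: lt)
        = (f0 :: (m0 ++ [l0])) :: (f1 :: (m1 ++ [l1])) :: pvReassemble ft mt lt from rfl]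
  unfold pvRotateB
  rw [show (((f0 :: (m0 ++ [l0])) :: (f1 :: (m1 ++ [l1])) :: pvReassemble ft mt lt).getD 1 []) 
        = f1 :: (m1 ++ [l1]) from by rw [List.getD_cons_succ, List.getD_cons_zero]]
  rw [show (((f0 :: (m0 ++ [l0])) :: (f1 :: (m1 ++ [l1])) :: pvReassemble ft mt lt).headD [])
        = f0 :: (m0 ++ [l0]) from rfl]
  rw [show ((f0 :: (m0 ++ [l0])) : List Int) = (f0 :: m0) ++ [l0] from rfl, List.dropLast_concat]
  rw [show (((f0 :: m0) ++ [l0]) :: (f1 :: (m1 ++ [l1])) :: pvReassemble ft mt lt).drop 1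
        = (f1 :: (m1 ++ [l1])) :: pvReassemble ft mt lt from rfl]
  rw [show (((f0 :: m0) ++ [l0]) :: (f1 :: (m1 ++ [l1])) :: pvReassemble ft mt lt).drop 2
        = pvReassemble ft mt lt from rfl]
  rw [show ((f0 :: m0) ++ [l0] : List Int) = f0 :: (m0 ++ [l0]) from rfl]
  rw [pv_zip3_eq ft mt lt f1 f0 m1 m0 l1 l0 h1 h2]
  -- bottom row
  rw [show ((f0 :: (m0 ++ [l0])) :: (f1 :: (m1 ++ [l1])) :: pvReassemble ft mt lt)
        = pvReassemble (f0 :: f1 :: ft) (m0 :: m1 :: mt) (l0 :: l1 :: lt) from rfl]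
  rw [pv_re_getLast (f1 :: ft) (m1 :: mt) (l1 :: lt) f0 m0 l0 [] 0 [] 0
        (by simpa using h1) (by simpa using h2)]
  rw [pv_re_dropLast (f1 :: ft) (m1 :: mt) (l1 :: lt) f0 m0 l0
        (by simpa using h1) (by simpa using h2)]
  rw [show ((f0 :: f1 :: ft).dropLast) = f0 :: (f1 :: ft).dropLast from rfl,
    show ((m0 :: m1 :: mt).dropLast) = m0 :: (m1 :: mt).dropLast from rfl,
    show ((l0 :: l1 :: lt).dropLast) = l0 :: (l1 :: lt).dropLast from rfl]
  rw [pv_re_getLast ((f1 :: ft).dropLast) ((m1 :: mt).dropLast) ((l1 :: lt).dropLast) f0 m0 l0 [] 0 [] 0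
        (by simp [List.length_dropLast]; omega) (by simp [List.length_dropLast]; omega)]
  rw [show ((f0 :: (f1 :: ft).dropLast).getLastD 0
          :: ((m0 :: (m1 :: mt).dropLast).getLastD [] ++ [(l0 :: (l1 :: lt).dropLast).getLastD 0])).getLastD 0
        = (((m0 :: (m1 :: mt).dropLast).getLastD [] ++ [(l0 :: (l1 :: lt).dropLast).getLastD 0])).getLastD
            ((f0 :: (f1 :: ft).dropLast).getLastD 0) from List.getLastD_cons,
    List.getLastD_concat]
  rw [show ((f0 :: f1 :: ft).getLastD 0 :: ((m0 :: m1 :: mt).getLastD [] ++ [(l0 :: l1 :: lt).getLastD 0])).drop 1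
        = (m0 :: m1 :: mt).getLastD [] ++ [(l0 :: l1 :: lt).getLastD 0] from rfl]
  simp only [List.getLastD_cons, List.headI_cons, List.nil_append, List.cons_append,
    List.append_assoc]

-- ShiftRow: B's slice rotation of the assembled grid = rotating A's three deques
theorem pv_shift_eq (fs : List Int) (ms : List (List Int)) (ls : List Int)
    (h1 : fs.length = ms.length) (h2 : ms.length = ls.length) :
    (pvReassemble fs ms ls).drop ((pvReassemble fs ms ls).length - 1)
        ++ (pvReassemble fs ms ls).dropLast
      = pvReassemble (pvRotR fs) (pvRotR ms) (pvRotR ls) := by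
  match fs, ms, ls, h1, h2 with
  | [], [], [], _, _ => rfl
  | [], _ :: _, _, h1, _ => simp at h1
  | _ :: _, [], _, h1, _ => simp at h1
  | _ :: _, _ :: _, [], _, h2 => simp at h2
  | f :: fs, m :: ms, l :: ls, h1, h2 =>
      rw [show pvReassemble (f :: fs) (m :: ms) (l :: ls)
            = (f :: (m ++ [l])) :: pvReassemble fs ms ls from rfl]
      rw [pv_drop_sub_one (pvReassemble fs ms ls) (f :: (m ++ [l]))]
      rw [show ((f :: (m ++ [l])) :: pvReassemble fs ms ls)
            = pvReassemble (f :: fs) (m :: ms) (l :: ls) from rfl]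
      rw [pv_re_getLast fs ms ls f m l [] 0 [] 0 (by simpa using h1) (by simpa using h2)]
      rw [pv_re_dropLast fs ms ls f m l (by simpa using h1) (by simpa using h2)]
      rw [pv_rotR_eq f fs 0, pv_rotR_eq m ms [], pv_rotR_eq l ls 0]
      rfl

-- the whole operation loop
theorem pv_loop : ∀ (ops : List String) (fs : List Int) (ms : List (List Int)) (ls : List Int),
    fs.length = ms.length → ms.length = ls.length → (2 ≤ fs.length ∨ "Rotate" ∉ ops) →
    pvReassemble (ops.foldl pvStep (ms, fs, ls)).2.1 (ops.foldl pvStep (ms, fs, ls)).1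
        (ops.foldl pvStep (ms, fs, ls)).2.2
      = ops.foldl pvStepB (pvReassemble fs ms ls)
  | [], _, _, _, _, _, _ => rfl
  | op :: ops, fs, ms, ls, h1, h2, hd => by
      by_cases hop : op = "Rotate"
      · subst hop
        have h2fs : 2 ≤ fs.length := by
          rcases hd with h | h
          · exact h
          · exact absurd (by simp) h
        match fs, ms, ls, h1, h2, h2fs with
        | [], _, _, _, _, h2fs => simp at h2fs
        | [_], _, _, _, _, h2fs => simp at h2fs
        | _ :: _ :: _, [], _, h1, _, _ => simp at h1
        | _ :: _ :: _, [_], _, h1, _, _ => simp at h1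
        | _ :: _ :: _, _ :: _ :: _, [], _, h2, _ => simp at h2
        | _ :: _ :: _, _ :: _ :: _, [_], _, h2, _ => simp at h2
        | f0 :: f1 :: ft, m0 :: m1 :: mt, l0 :: l1 :: lt, h1, h2, _ =>
          have h1' : ft.length = mt.length := by simpa using h1
          have h2' : mt.length = lt.length := by simpa using h2
          rw [List.foldl_cons, List.foldl_cons,
            show pvStep (m0 :: m1 :: mt, f0 :: f1 :: ft, l0 :: l1 :: lt) "Rotate"
              = pvStepA (m0 :: m1 :: mt, f0 :: f1 :: ft, l0 :: l1 :: lt) from if_pos rfl,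
            show pvStepB (pvReassemble (f0 :: f1 :: ft) (m0 :: m1 :: mt) (l0 :: l1 :: lt)) "Rotate"
              = pvRotateB (pvReassemble (f0 :: f1 :: ft) (m0 :: m1 :: mt) (l0 :: l1 :: lt)) from if_pos rfl,
            pv_rot_eq f0 f1 ft m0 m1 mt l0 l1 lt h1' h2']
          rw [pv_stepA_shape]
          exact pv_loop ops _ _ _
            (by simp [pv_modLast_len]; omega)
            (by simp [pv_modLast_len, List.length_dropLast]; omega)
            (Or.inl (by simp))
      · rw [List.foldl_cons, List.foldl_cons,
          show pvStep (ms, fs, ls) op = (pvRotR ms, pvRotR fs, pvRotR ls) from if_neg hop,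
          show pvStepB (pvReassemble fs ms ls) op
            = (pvReassemble fs ms ls).drop ((pvReassemble fs ms ls).length - 1)
                ++ (pvReassemble fs ms ls).dropLast from if_neg hop,
          pv_shift_eq fs ms ls h1 h2]
        exact pv_loop ops _ _ _ (by simp [pv_rotR_len]; omega) (by simp [pv_rotR_len]; omega)
          (by rcases hd with h | h
              · exact Or.inl (by simpa [pv_rotR_len] using h)
              · exact Or.inr (fun hm => h (List.mem_cons_of_mem _ hm)))

-- ===== VERDICT (by name: the statement is the Claim_ definition above) =====
theorem solution_spec : Claim_equal_solution := by
  intro rc ops _ hpre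
  unfold Spec_solution solution solution_alt
  rw [pv_loop ops (rc.map (fun r => r.headI)) (rc.map (fun r => (r.drop 1).dropLast))
        (rc.map (fun r => r.getLastD 0)) (by simp) (by simp)
        (by rcases hpre.2.2 with h | h
            · exact Or.inl (by simpa using h)
            · exact Or.inr h),
    pv_re_self rc hpre.1]
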